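-- pv_equiv track=rewrite | github.com/Seunghoon-Schini-Yang/Algorithm_Schini | 프로그래머스/lv4/42891. 무지의 먹방 라이브/무지의 먹방 라이브.py | solution
-- ===== SOURCE A (Python) =====
-- def solution(food_times, k):
--     cutoff = 0
--     food_times = [(time, i) for i, time in enumerate(food_times, start=1)]
--     food_times.sort(key=lambda x: -x[0])
--     while food_times:
--         while food_times[-1][0] == cutoff:
--             food_times.pop()
--             if not food_times:
--                 return -1
--         cur = food_times[-1][0]
--         if len(food_times) * (cur-cutoff) <= k:
--             k -= len(food_times) * (cur-cutoff)
--             food_times.pop()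
--         else:
--             k %= len(food_times)
--             break
--         cutoff = cur
--     food_times.sort(key=lambda x: x[1])
--     return food_times[k][1] if food_times else -1
-- ===== SOURCE B (Python) =====
-- def solution(food_times, k):
--     # Binary search on the "level" prefix-cost instead of simulating the eating loop.
--     n = len(food_times)
--     asc = sorted(food_times)
--     # fs[t-1] = total seconds needed to finish the t smallest foods completely
--     fs = []
--     p = 0
--     for t in range(1, n + 1):
--         p += asc[t - 1]
--         fs.append(p + (n - t) * asc[t - 1])
--     # first index lo with fs[lo] > k (fs is nondecreasing); lo == n -> everything eaten
--     lo, hi = 0, n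
--     while lo < hi:
--         mid = (lo + hi) // 2
--         if fs[mid] <= k:
--             lo = mid + 1
--         else:
--             hi = mid
--     if lo == n:
--         return -1
--     r = (k - (fs[lo - 1] if lo > 0 else 0)) % (n - lo)
--     if lo == 0:
--         survivors = list(range(1, n + 1))
--     else:
--         cut = asc[lo - 1]
--         survivors = [i for i, v in enumerate(food_times, start=1) if v > cut]
--     return survivors[r]
-- ===== Notes on version B (the rewrite author's own statement) =====
-- stated objective: alternative
-- what changed: B replaces A's destructive pop-and-subtract simulation of the eating rounds by prefix-cost arithmetic: it sorts the times, builds the nondecreasing list of total seconds needed to finish the t smallest foods, binary-searches the first level exceeding k (O(log n) instead of A's O(n) per-item loop after the sort), and selects the answer among the surviving foods by index arithmetic.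
-- outside the precondition, e.g. on solution([0], -1): A returns -1, B returns 1; on solution([0, 1], -2): A returns 2, B returns 1
import Mathlib
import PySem

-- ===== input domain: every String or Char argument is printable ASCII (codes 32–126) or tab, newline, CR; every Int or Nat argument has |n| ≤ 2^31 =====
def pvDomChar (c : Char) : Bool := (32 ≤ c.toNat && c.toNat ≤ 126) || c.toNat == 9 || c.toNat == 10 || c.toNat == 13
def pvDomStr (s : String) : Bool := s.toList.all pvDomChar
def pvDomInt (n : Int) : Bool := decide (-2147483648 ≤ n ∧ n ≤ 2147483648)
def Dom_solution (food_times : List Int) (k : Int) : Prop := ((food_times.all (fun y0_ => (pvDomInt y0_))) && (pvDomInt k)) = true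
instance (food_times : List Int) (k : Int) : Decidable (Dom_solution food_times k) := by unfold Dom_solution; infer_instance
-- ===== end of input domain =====

-- B replaces A's pop-and-subtract simulation by prefix-cost arithmetic with a binary search;
-- equivalence is about the return value (A only mutates its local rebinding, not the caller's list).

-- ===== PORT A =====

-- inner `while food_times[-1][0] == cutoff:` loop: pops trailing items equal to cutoff;
-- `none` models the `return -1` when the list empties (the [] entry case is unreachable:
-- the outer loop only runs on a nonempty list).
def innerA (lst : List (Int × Int)) (cutoff : Int) : Option (List (Int × Int)) :=
  match h : lst.getLast? with
  | none => none
  | some x =>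
    if x.1 = cutoff then
      if lst.dropLast = [] then none else innerA lst.dropLast cutoff
    else some lst
termination_by lst.length
decreasing_by
  have hne : lst ≠ [] := by intro hn; subst hn; simp at h
  have : 0 < lst.length := List.length_pos_iff.mpr hne
  simp [List.length_dropLast]; omega

theorem innerA_length_le (lst : List (Int × Int)) (c : Int) :
    ∀ l', innerA lst c = some l' → l'.length ≤ lst.length ∧ l' ≠ [] := by
  fun_induction innerA lst c with
  | case1 l h => intro l' hl; simp at hl
  | case2 l x h hx hemp => intro l' hl; simp at hl
  | case3 l x h hx hemp ih =>
      intro l' hl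
      have hne : l ≠ [] := by intro hn; subst hn; simp at h
      have hlen : 0 < l.length := List.length_pos_iff.mpr hne
      have := ih l' hl
      refine ⟨this.1.trans ?_, this.2⟩
      simp [List.length_dropLast]
  | case4 l x h hx =>
      intro l' hl; simp at hl; subst hl
      exact ⟨le_refl _, by intro hn; subst hn; simp at h⟩

-- outer `while food_times:` loop; `some (k, rem)` is the state at normal exit or `break`,
-- `none` is the inner loop's `return -1`.
def outerA (lst : List (Int × Int)) (cutoff k : Int) : Option (Int × List (Int × Int)) :=
  if hl : lst = [] then some (k, [])
  else
    match hi : innerA lst cutoff with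
    | none => none
    | some l' =>
      let cur := ((l'.getLast?).getD (0, 0)).1   -- l' is nonempty here; the default is dead
      let m : Int := l'.length
      if m * (cur - cutoff) ≤ k then outerA l'.dropLast cur (k - m * (cur - cutoff))
      else some (PySem.Int.mod k m, l')
termination_by lst.length
decreasing_by
  have h := innerA_length_le lst cutoff l' hi
  have h2 : 0 < l'.length := List.length_pos_iff.mpr h.2
  have : l'.dropLast.length < l'.length := by simp [List.length_dropLast]; omega
  omega
def solution (food_times : List Int) (k : Int) : Int :=
  let lst := PySem.List.sorted ((PySem.List.enumerate food_times 1).map (fun p => (p.2, p.1)))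
      (fun x => -x.1)
  match outerA lst 0 k with
  | none => -1
  | some (k', rem) =>
    let s := PySem.List.sorted rem (fun x => x.2)
    if s = [] then -1 else (PySem.List.pyGetD s k' (0, 0)).2   -- index always in range here

-- ===== PORT B =====

-- hand-written binary search of Source B: first index in [lo, hi) whose fs-entry exceeds k
def bsearchB (fs : List Int) (k : Int) (lo hi : Nat) : Nat :=
  if lo < hi then
    let mid := (lo + hi) / 2
    if PySem.List.pyGetD fs (mid : Int) 0 ≤ k then bsearchB fs k (mid + 1) hi
    else bsearchB fs k lo mid
  else lo
termination_by hi - lo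
decreasing_by all_goals omega

def solution_alt (food_times : List Int) (k : Int) : Int :=
  let n := food_times.length
  let asc := PySem.List.sorted food_times (fun v => v)
  -- fs[t-1] = total seconds needed to finish the t smallest foods completely
  let st := (PySem.List.pyRange 1 ((n : Int) + 1) 1).foldl
      (fun (st : List Int × Int) t =>
        let p := st.2 + PySem.List.pyGetD asc (t - 1) 0
        (st.1 ++ [p + ((n : Int) - t) * PySem.List.pyGetD asc (t - 1) 0], p))
      ([], 0)
  let fs := st.1
  let lo := bsearchB fs k 0 n
  if lo = n then -1
  else
    let r := PySem.Int.mod (k - (if 0 < lo then PySem.List.pyGetD fs ((lo : Int) - 1) 0 else 0))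
        ((n : Int) - (lo : Int))
    let survivors : List Int :=
      if lo = 0 then PySem.List.pyRange 1 ((n : Int) + 1) 1
      else
        let cut := PySem.List.pyGetD asc ((lo : Int) - 1) 0
        ((PySem.List.enumerate food_times 1).filter (fun p => cut < p.2)).map (fun p => p.1)
    PySem.List.pyGetD survivors r 0   -- index always in range here

-- ===== PRECONDITION & SPEC =====

-- Pre_ excludes only negative k on a list whose minimum is exactly 0: there A's unconditional
-- pre-pop of zero-time foods (before any time comparison) makes the returned value an accident
-- of the loop shape; k is an elapsed time and is never negative in the problem.
def Pre_solution (food_times : List Int) (k : Int) : Prop :=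
  0 ≤ k ∨ ¬((0 : Int) ∈ food_times ∧ ∀ v ∈ food_times, 0 ≤ v)
instance (food_times : List Int) (k : Int) : Decidable (Pre_solution food_times k) := by
  unfold Pre_solution; infer_instance

def pvWitness_solution : List Int × Int := ([3, 1, 2], 5)

def Spec_solution (food_times : List Int) (k : Int) (out : Int) : Prop := out = solution_alt food_times k
instance (food_times : List Int) (k : Int) (out : Int) : Decidable (Spec_solution food_times k out) := by unfold Spec_solution; infer_instance

-- ===== CLAIM (what is proved, stated in full; the proofs are below) =====
def Claim_equal_solution : Prop := ∀ (food_times : List Int) (k : Int), Dom_solution food_times k → Pre_solution food_times k → Spec_solution food_times k (solution food_times k)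

-- ===== LEMMAS AND PROOFS =====

-- proof-side reference programs -------------------------------------------------

-- A's two nested while loops, rephrased on the REVERSED (ascending) list, one pop per step
def simA : List (Int × Int) → Int → Int → Option (Int × List (Int × Int))
  | [], _, k => some (k, [])
  | x :: t, c, k =>
    if x.1 = c then (if t = [] then none else simA t c k)
    else
      if ((x :: t).length : Int) * (x.1 - c) ≤ k then
        simA t x.1 (k - ((x :: t).length : Int) * (x.1 - c))
      else some (PySem.Int.mod k ((x :: t).length : Int), x :: t)

-- the same scan without the equal-to-cutoff pops (they cost 0 time)
def lin : List (Int × Int) → Int → Int → Option (Int × List (Int × Int))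
  | [], _, k => some (k, [])
  | x :: t, c, k =>
    if ((x :: t).length : Int) * (x.1 - c) ≤ k then
      lin t x.1 (k - ((x :: t).length : Int) * (x.1 - c))
    else some (PySem.Int.mod k ((x :: t).length : Int), x :: t)

-- merge the two "-1" outcomes (inner-loop return and empty list at exit)
def squash : Option (Int × List (Int × Int)) → Option (Int × List (Int × Int))
  | none => none
  | some (_, []) => none
  | some (k, x :: t) => some (k, x :: t)

theorem squash_eq_none (o : Option (Int × List (Int × Int))) :
    squash o = none ↔ (o = none ∨ ∃ k', o = some (k', [])) := by
  rcases o with _ | ⟨k', _ | ⟨x, t⟩⟩ <;> simp [squash]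

theorem squash_eq_some (o : Option (Int × List (Int × Int))) (p : Int × List (Int × Int))
    (h : squash o = some p) : o = some p := by
  rcases o with _ | ⟨k', _ | ⟨x, t⟩⟩ <;> simp_all [squash]

theorem getD_eq_getElem' (xs : List Int) (i : Nat) (h : i < xs.length) :
    xs.getD i 0 = xs[i] := by
  simp [List.getD_eq_getElem?_getD, List.getElem?_eq_getElem h]

def fspec (n : Nat) (vs : List Int) (i : Nat) : Int :=
  (vs.take (i + 1)).sum + ((n : Int) - i - 1) * vs.getD i 0

def cp (vs : List Int) (j : Nat) : Int := if j = 0 then 0 else vs.getD (j - 1) 0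
def fp (n : Nat) (vs : List Int) (j : Nat) : Int := if j = 0 then 0 else fspec n vs (j - 1)

-- bridge: outerA on the reversed list is simA ------------------------------------

theorem outerA_congr (l1 l2 : List (Int × Int)) (c k : Int) (h1 : l1 ≠ []) (h2 : l2 ≠ [])
    (h : innerA l1 c = innerA l2 c) : outerA l1 c k = outerA l2 c k := by
  conv_lhs => rw [outerA]
  conv_rhs => rw [outerA]
  rw [dif_neg h1, dif_neg h2, h]

theorem outerA_reverse (ys : List (Int × Int)) (c k : Int) :
    outerA ys.reverse c k = (simA ys c k).map (fun p => (p.1, p.2.reverse)) := by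
  induction ys generalizing c k with
  | nil => rw [outerA]; simp [simA]
  | cons x t ih =>
    by_cases hx : x.1 = c
    · cases t with
      | nil =>
          have hin : innerA [x] c = none := by
            rw [innerA]
            split
            · next h => simp at h
            · next x1 h =>
                have hx1 : x = x1 := by simpa using h
                subst hx1
                simp [hx]
          have hsim : simA [x] c k = none := by rw [simA]; simp [hx]
          rw [hsim, show ([x] : List (Int × Int)).reverse = [x] from rfl, outerA,
            dif_neg (by simp : ¬([x] : List (Int × Int)) = [])]
          split
          · rfl
          · next l' h => rw [hin] at h; cases h
      | cons y u =>
          have hin : innerA ((x :: y :: u).reverse) c = innerA ((y :: u).reverse) c := by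
            rw [innerA]
            split
            · next h => rw [List.getLast?_reverse] at h; simp at h
            · next x1 h =>
                rw [List.getLast?_reverse] at h
                have hx1 : x = x1 := by simpa using h
                subst hx1
                rw [if_pos hx]
                have hd : (x :: y :: u).reverse.dropLast = (y :: u).reverse := by
                  simp [List.reverse_cons, List.dropLast_concat]
                rw [hd, if_neg (by simp : ¬((y :: u : List (Int × Int))).reverse = [])]
          rw [outerA_congr _ _ c k (by simp) (by simp) hin, ih]
          have hsim : simA (x :: y :: u) c k = simA (y :: u) c k := by
            rw [simA]; simp [hx]
          rw [hsim]
    · have hin : innerA ((x :: t).reverse) c = some ((x :: t).reverse) := by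
        rw [innerA]
        split
        · next h => rw [List.getLast?_reverse] at h; simp at h
        · next x1 h =>
            rw [List.getLast?_reverse] at h
            have hx1 : x = x1 := by simpa using h
            subst hx1
            rw [if_neg hx]
      rw [outerA, dif_neg (by simp : ¬(x :: t : List (Int × Int)).reverse = [])]
      split
      · next h => rw [hin] at h; cases h
      · next l' h =>
          rw [hin] at h
          injection h with h
          subst h
          simp only [List.reverse_cons, List.getLast?_concat, Option.getD_some,
            List.length_append, List.length_reverse, List.length_cons, List.length_nil,
            List.dropLast_concat]
          rw [simA]
          simp only [hx, if_false, List.length_cons]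
          by_cases hle : ((t.length : Int) + 1) * (x.1 - c) ≤ k
          · rw [if_pos (by push_cast; push_cast at hle; nlinarith [hle]),
              if_pos (by push_cast; push_cast at hle; nlinarith [hle]), ih]
            try (first
            | rfl
            | (congr 2 <;> (push_cast; try ring)))
          · rw [if_neg (by push_cast; push_cast at hle; intro hc; exact hle (by nlinarith [hc])),
              if_neg (by push_cast; push_cast at hle; intro hc; exact hle (by nlinarith [hc]))]
            simp only [Option.map_some, List.reverse_cons]
            try norm_num

-- pops of equal-to-cutoff items are free: simA and lin agree up to squash ---------

theorem squash_simA_lin (ys : List (Int × Int)) (c k : Int)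
    (hk : 0 ≤ k ∨ ∀ x ∈ ys.head?, x.1 ≠ c) :
    squash (simA ys c k) = squash (lin ys c k) := by
  induction ys generalizing c k with
  | nil => rfl
  | cons x t ih =>
    by_cases hx : x.1 = c
    · have hk0 : 0 ≤ k := by
        rcases hk with h | h
        · exact h
        · exact absurd hx (h x (by simp))
      cases t with
      | nil =>
          have h0 : (((x :: [] : List (Int × Int))).length : Int) * (x.1 - c) = 0 := by
            rw [hx]; ring
          rw [simA, lin, h0]
          simp [hx, hk0, lin, squash]
      | cons y u =>
          have h0 : (((x :: y :: u : List (Int × Int))).length : Int) * (x.1 - c) = 0 := by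
            rw [hx]; ring
          rw [simA, lin, h0]
          simp only [hx, hk0, if_true, if_neg (by simp : ¬(y :: u : List (Int × Int)) = []),
            sub_zero]
          exact ih c k (Or.inl hk0)
    · rw [simA, lin]
      simp only [hx, if_false]
      by_cases hle : ((x :: t).length : Int) * (x.1 - c) ≤ k
      · rw [if_pos hle, if_pos hle]
        apply ih
        left
        nlinarith [hle]
      · rw [if_neg hle, if_neg hle]

-- prefix-cost arithmetic ----------------------------------------------------------

theorem sum_take_succ (vs : List Int) (m : Nat) (hm : m < vs.length) :
    (vs.take (m + 1)).sum = (vs.take m).sum + vs.getD m 0 := by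
  rw [List.sum_take_succ vs m hm]
  simp [List.getD, List.getElem?_eq_getElem hm]

theorem fspec_step (n : Nat) (vs : List Int) (hn : vs.length = n) (j : Nat) (hj : j < n) :
    fspec n vs j = fp n vs j + ((n : Int) - j) * (vs.getD j 0 - cp vs j) := by
  cases j with
  | zero =>
      obtain ⟨v, t, rfl⟩ : ∃ v t, vs = v :: t := by
        cases vs
        · simp at hn; omega
        · exact ⟨_, _, rfl⟩
      simp [fspec, fp, cp]
      ring
  | succ j' =>
      have h1 : j' + 1 < vs.length := by omega
      simp only [fspec, fp, cp, if_neg (Nat.succ_ne_zero j'), Nat.add_sub_cancel]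
      rw [sum_take_succ vs (j' + 1) h1]
      push_cast
      ring

theorem fspec_mono (n : Nat) (vs : List Int) (hn : vs.length = n)
    (hs : vs.Pairwise (· ≤ ·)) (i j : Nat) (hij : i ≤ j) (hj : j < n) :
    fspec n vs i ≤ fspec n vs j := by
  induction j with
  | zero => interval_cases i; rfl
  | succ j' ih =>
      rcases Nat.lt_or_ge i (j' + 1) with hlt | hge
      · have step : fspec n vs j' ≤ fspec n vs (j' + 1) := by
          have h1 : j' + 1 < vs.length := by omega
          have h0 : j' < vs.length := by omega
          have hg : vs[j'] ≤ vs[j' + 1] :=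
            (List.pairwise_iff_getElem.mp hs) j' (j' + 1) h0 h1 (by omega)
          simp only [fspec]
          rw [sum_take_succ vs (j' + 1) h1, getD_eq_getElem' vs j' h0,
            getD_eq_getElem' vs (j' + 1) h1]
          have hc : (0 : Int) ≤ (n : Int) - (j' + 1) - 1 + 1 := by
            have : j' + 1 < n := hj
            omega
          push_cast
          nlinarith [hg]
        exact le_trans (ih (by omega) (by omega)) step
      · have : i = j' + 1 := by omega
        subst this; rfl

-- the foldl of solution_alt builds exactly the list of prefix costs ---------------

theorem fold_spec (n : Nat) (vs : List Int) (hn : vs.length = n) (m : Nat) (hm : m ≤ n) :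
    (PySem.List.pyRange 1 ((m : Int) + 1)).foldl
      (fun (st : List Int × Int) t =>
        (st.1 ++ [st.2 + PySem.List.pyGetD vs (t - 1) 0 +
          ((n : Int) - t) * PySem.List.pyGetD vs (t - 1) 0],
         st.2 + PySem.List.pyGetD vs (t - 1) 0))
      ([], 0)
    = ((List.range m).map (fspec n vs), (vs.take m).sum) := by
  induction m with
  | zero =>
      have h0 : PySem.List.pyRange 1 ((0 : Int) + 1) = [] := by decide
      simp [h0]
  | succ m ih =>
      have hm' : m ≤ n := by omega
      have hcast : ((m + 1 : Nat) : Int) + 1 = ((m : Int) + 1) + 1 := by push_cast; ring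
      rw [hcast, PySem.List.pyRange_one_succ_right (by omega), List.foldl_append,
        ih hm']
      have hg : PySem.List.pyGetD vs ((m : Int) + 1 - 1) 0 = vs.getD m 0 := by
        rw [show ((m : Int) + 1 - 1) = ((m : Nat) : Int) by ring, PySem.List.pyGetD_natCast]
      have hmlt : m < vs.length := by omega
      simp only [List.foldl_cons, List.foldl_nil, hg]
      rw [List.range_succ, List.map_append, ← sum_take_succ vs m hmlt]
      refine Prod.ext ?_ rfl
      simp only [List.map_cons, List.map_nil]
      congr 1
      simp only [List.cons.injEq, and_true]
      rw [fspec, sum_take_succ vs m hmlt]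
      push_cast
      ring


-- the hand-written binary search finds the first prefix cost exceeding k ----------

theorem bsearchB_spec (fs : List Int) (k : Int) (lo hi : Nat) :
    fs.Pairwise (· ≤ ·) → lo ≤ hi → hi ≤ fs.length →
    (∀ i (h : i < fs.length), i < lo → fs[i] ≤ k) →
    (∀ i (h : i < fs.length), hi ≤ i → k < fs[i]) →
    lo ≤ bsearchB fs k lo hi ∧ bsearchB fs k lo hi ≤ hi ∧
      (∀ i (h : i < fs.length), i < bsearchB fs k lo hi → fs[i] ≤ k) ∧
      (∀ i (h : i < fs.length), bsearchB fs k lo hi ≤ i → k < fs[i]) := by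
  fun_induction bsearchB fs k lo hi with
  | case1 lo hi hlt mid hle ih =>
      intro hfs hlohi hhi hlow hhigh
      have hmidlt : mid < fs.length := by omega
      have hmid : fs[mid] ≤ k := by
        rw [PySem.List.pyGetD_natCast, getD_eq_getElem' fs mid hmidlt] at hle
        exact hle
      have hres := ih hfs (by omega) hhi
        (by
          intro i hilen hi2
          rcases Nat.lt_or_ge i mid with h | h
          · exact le_trans (List.pairwise_iff_getElem.mp hfs i mid hilen hmidlt h) hmid
          · have : i = mid := by omega
            subst this; exact hmid)
        hhigh
      exact ⟨by have := hres.1; omega, hres.2.1, hres.2.2.1, hres.2.2.2⟩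
  | case2 lo hi hlt mid hle ih =>
      intro hfs hlohi hhi hlow hhigh
      have hmidlt : mid < fs.length := by omega
      have hmid : k < fs[mid] := by
        rw [PySem.List.pyGetD_natCast, getD_eq_getElem' fs mid hmidlt] at hle
        omega
      have hres := ih hfs (by omega) (by omega) hlow
        (by
          intro i hilen hi2
          rcases Nat.lt_or_ge mid i with h | h
          · exact lt_of_lt_of_le hmid (List.pairwise_iff_getElem.mp hfs mid i hmidlt hilen h)
          · have : i = mid := by omega
            subst this; exact hmid)
      exact ⟨hres.1, by have := hres.2.1; omega, hres.2.2.1, hres.2.2.2⟩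
  | case3 lo hi hlt =>
      intro hfs hlohi hhi hlow hhigh
      exact ⟨le_refl _, by omega, fun i h hi2 => hlow i h hi2,
        fun i h hi2 => hhigh i h (by omega)⟩

-- the linear scan, characterised by the first index whose prefix cost exceeds k ---

theorem lin_char (ps : List (Int × Int)) (k : Int) (T : Nat)
    (hs : ps.Pairwise (fun a b => a.1 ≤ b.1))
    (hT : T ≤ ps.length)
    (P1 : ∀ i, i < T → fspec ps.length (ps.map Prod.fst) i ≤ k)
    (P2 : ∀ i, T ≤ i → i < ps.length → k < fspec ps.length (ps.map Prod.fst) i) :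
    ∀ j, j ≤ T →
      squash (lin (ps.drop j) (cp (ps.map Prod.fst) j) (k - fp ps.length (ps.map Prod.fst) j)) =
        if T = ps.length then none
        else some (PySem.Int.mod (k - fp ps.length (ps.map Prod.fst) T)
          ((ps.length : Int) - T), ps.drop T) := by
  set vs := ps.map Prod.fst with hvs
  set n := ps.length with hn
  have hvslen : vs.length = n := by simp [hvs, hn]
  have hval : ∀ (j : Nat) (h : j < n), vs.getD j 0 = (ps[j]'h).1 := by
    intro j h
    rw [getD_eq_getElem' vs j (by omega)]
    simp [hvs]
  have hdroplen : ∀ j : Nat, j ≤ n → ((ps.drop j).length : Int) = (n : Int) - j := by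
    intro j h
    rw [List.length_drop]
    omega
  have main : ∀ d j, j ≤ T → T - j = d →
      squash (lin (ps.drop j) (cp vs j) (k - fp n vs j)) =
        if T = n then none
        else some (PySem.Int.mod (k - fp n vs T) ((n : Int) - T), ps.drop T) := by
    intro d
    induction d with
    | zero =>
        intro j hj hd
        have hjT : j = T := by omega
        subst hjT
        by_cases hTn : j = n
        · rw [if_pos hTn, show ps.drop j = [] from by rw [hTn]; simp [hn]]
          rw [lin]
          rfl
        · have hjlt : j < n := by omega
          rw [if_neg hTn, List.drop_eq_getElem_cons (by omega : j < ps.length), lin]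
          have hcond : ¬(((ps[j]'(by omega) :: ps.drop (j + 1)).length : Int) *
              ((ps[j]'(by omega)).1 - cp vs j) ≤ k - fp n vs j) := by
            have hstep := fspec_step n vs hvslen j hjlt
            have hlen : ((ps[j]'(by omega) :: ps.drop (j + 1)).length : Int) = (n : Int) - j := by
              simp only [List.length_cons, List.length_drop]
              push_cast [hn]
              omega
            rw [hlen, ← hval j hjlt]
            have hP2 := P2 j (le_refl _) (by omega)
            intro hc
            linarith [hstep, hP2, hc]
          rw [if_neg hcond]
          simp only [squash]
          rw [show ((ps[j]'(by omega) :: ps.drop (j + 1)).length : Int) = (n : Int) - j from by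
            simp only [List.length_cons, List.length_drop]; push_cast [hn]; omega]
    | succ d ih =>
        intro j hj hd
        have hjT : j < T := by omega
        have hjlt : j < n := by omega
        rw [List.drop_eq_getElem_cons (by omega : j < ps.length), lin]
        have hstep := fspec_step n vs hvslen j hjlt
        have hlen : ((ps[j]'(by omega) :: ps.drop (j + 1)).length : Int) = (n : Int) - j := by
          simp only [List.length_cons, List.length_drop]
          push_cast [hn]
          omega
        have hP1 := P1 j hjT
        have hcond : (((ps[j]'(by omega) :: ps.drop (j + 1)).length : Int) *
            ((ps[j]'(by omega)).1 - cp vs j) ≤ k - fp n vs j) := by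
          rw [hlen, ← hval j hjlt]
          linarith [hstep, hP1]
        rw [if_pos hcond]
        have hnew : k - fp n vs j - (((ps[j]'(by omega) :: ps.drop (j + 1)).length : Int) *
            ((ps[j]'(by omega)).1 - cp vs j)) = k - fp n vs (j + 1) := by
          rw [hlen, ← hval j hjlt]
          have hfp : fp n vs (j + 1) = fspec n vs j := by
            simp [fp]
          linarith [hstep, hfp.ge, hfp.le]
        rw [hnew]
        have hcut : (ps[j]'(by omega)).1 = cp vs (j + 1) := by
          simp only [cp, if_neg (Nat.succ_ne_zero j), Nat.add_sub_cancel]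
          rw [hval j hjlt]
        rw [hcut]
        exact ih (j + 1) (by omega) (by omega)
  exact fun j hj => main (T - j) j hj rfl

-- sorted suffixes are value-threshold filters -------------------------------------

theorem drop_eq_filter (ps : List (Int × Int)) (T : Nat) (cut : Int)
    (hs : ps.Pairwise (fun a b => a.1 ≤ b.1)) (hTn : T < ps.length)
    (hcutle : ∀ i (h : i < ps.length), i < T → (ps[i]'h).1 ≤ cut)
    (hcutgt : cut < (ps[T]'hTn).1) :
    ps.drop T = ps.filter (fun x => decide (cut < x.1)) := by
  have hpg := List.pairwise_iff_getElem.mp hs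
  conv_rhs => rw [← List.take_append_drop T ps]
  rw [List.filter_append]
  have h1 : (ps.take T).filter (fun x => decide (cut < x.1)) = [] := by
    rw [List.filter_eq_nil_iff]
    intro a ha
    obtain ⟨i, hi, hieq⟩ := List.mem_iff_getElem.mp ha
    have hiT : i < T := by
      have := hi
      simp [List.length_take] at this
      omega
    have hina : a = ps[i]'(by omega) := by rw [← hieq, List.getElem_take]
    have hle := hcutle i (by omega) hiT
    simp only [hina, decide_eq_true_eq]
    omega
  have h2 : (ps.drop T).filter (fun x => decide (cut < x.1)) = ps.drop T := by
    rw [List.filter_eq_self]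
    intro a ha
    obtain ⟨i, hi, hieq⟩ := List.mem_iff_getElem.mp ha
    have hilen : T + i < ps.length := by
      have := hi
      simp [List.length_drop] at this
      omega
    have hina : a = ps[T + i]'hilen := by
      rw [← hieq, List.getElem_drop]
    have hge : (ps[T]'hTn).1 ≤ (ps[T + i]'hilen).1 := by
      rcases Nat.lt_or_ge T (T + i) with h | h
      · exact hpg T (T + i) (by omega) hilen h
      · have hi0 : i = 0 := by omega
        subst hi0
        simp
    simp only [decide_eq_true_eq]
    rw [hina]
    exact lt_of_lt_of_le hcutgt hge
  rw [h1, h2, List.nil_append]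

-- Pre_ gives the hypothesis squash_simA_lin needs ---------------------------------

theorem pre_head (ft : List Int) (k : Int) (ps : List (Int × Int))
    (hpre : Pre_solution ft k)
    (hperm : (ps.map Prod.fst).Perm ft)
    (hs : ps.Pairwise (fun a b => a.1 ≤ b.1)) :
    0 ≤ k ∨ ∀ x ∈ ps.head?, x.1 ≠ (0 : Int) := by
  rcases hpre with hk | hft
  · exact Or.inl hk
  · right
    intro x hx hx0
    cases ps with
    | nil => simp at hx
    | cons y t =>
        simp at hx; subst hx
        apply hft
        constructor
        · rw [← hx0]
          exact hperm.mem_iff.mp (by simp)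
        · intro v hv
          have hv' : v ∈ (y :: t).map Prod.fst := hperm.mem_iff.mpr hv
          rw [List.map_cons] at hv'
          rcases List.mem_cons.mp hv' with h | h
          · omega
          · obtain ⟨b, hb, rfl⟩ := List.mem_map.mp h
            have := (List.pairwise_cons.mp hs).1 b hb
            omega

-- main equivalence ----------------------------------------------------------------

theorem solution_eq_alt (ft : List Int) (k : Int) (hpre : Pre_solution ft k) :
    solution ft k = solution_alt ft k := by
  simp only [solution, solution_alt]
  set en := PySem.List.enumerate ft 1 with hen
  set sw := List.map (fun p => ((p.2 : Int), (p.1 : Int))) en with hsw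
  set descL := PySem.List.sorted sw (fun x => -x.1) with hdescL
  set asc := PySem.List.sorted ft (fun v => v) with hasc
  set n := ft.length with hn
  set ps := descL.reverse with hps
  -- basic facts
  have henlen : en.length = n := PySem.List.length_enumerate ft 1
  have hasclen : asc.length = n := by
    rw [hasc, PySem.List.length_sorted, hn]
  have hpslen : ps.length = n := by
    rw [hps, List.length_reverse, hdescL, PySem.List.length_sorted, hsw, List.length_map, henlen]
  have hperm : ps.Perm sw := by
    rw [hps]
    exact (List.reverse_perm descL).trans (by rw [hdescL]; exact PySem.List.sorted_perm sw _ false)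
  have hpair : ps.Pairwise (fun a b => a.1 ≤ b.1) := by
    rw [hps, List.pairwise_reverse]
    have h1 := PySem.List.sorted_pairwise sw (fun x => -x.1)
    rw [← hdescL] at h1
    exact h1.imp (fun h => by omega)
  have hswft : sw.map Prod.fst = ft := by
    rw [hsw, List.map_map]
    exact PySem.List.map_snd_enumerate ft 1
  have hvsft : (ps.map Prod.fst).Perm ft := by
    rw [← hswft]
    exact hperm.map Prod.fst
  have hvspair : (ps.map Prod.fst).Pairwise (· ≤ ·) :=
    List.pairwise_map.mpr (hpair.imp (fun h => h))
  have hvsasc : ps.map Prod.fst = asc := by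
    rw [hasc]
    exact (PySem.List.sorted_id_eq_of_perm_of_pairwise ft (ps.map Prod.fst) hvsft hvspair).symm
  have hswpair : sw.Pairwise (fun a b => a.2 < b.2) := by
    rw [hsw]
    exact List.pairwise_map.mpr ((PySem.List.pairwise_lt_enumerate ft 1).imp (fun h => h))
  -- the foldl builds the prefix costs
  rw [fold_spec n asc hasclen n (le_refl n)]
  set fs := (List.range n).map (fspec n asc) with hfs
  have hfslen : fs.length = n := by rw [hfs, List.length_map, List.length_range]
  have hfsget : ∀ i (h : i < n), fs[i]'(by omega) = fspec n asc i := by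
    intro i h
    simp [hfs]
  have hfspair : fs.Pairwise (· ≤ ·) := by
    rw [List.pairwise_iff_getElem]
    intro i j hi hj hij
    rw [hfsget i (by omega), hfsget j (by omega)]
    exact fspec_mono n asc hasclen (hvsasc ▸ hvspair) i j (by omega) (by omega)
  -- reduce the pair projection from fold_spec's result
  rw [show ((fs, (asc.take n).sum) : List Int × Int).1 = fs from rfl]
  set T := bsearchB fs k 0 n with hTdef
  have hbs := bsearchB_spec fs k 0 n hfspair (by omega) (by omega)
    (by intro i h hi; omega)
    (by intro i h hi; rw [hfslen] at h; omega)
  obtain ⟨-, hTle, Q1, Q2⟩ := hbs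
  have P1 : ∀ i, i < T → fspec n asc i ≤ k := by
    intro i hi
    have := Q1 i (by omega) hi
    rwa [hfsget i (by omega)] at this
  have P2 : ∀ i, T ≤ i → i < n → k < fspec n asc i := by
    intro i hi hilt
    have := Q2 i (by omega) hi
    rwa [hfsget i (by omega)] at this
  -- the A side, squashed
  have houter : outerA descL 0 k = (simA ps 0 k).map (fun p => (p.1, p.2.reverse)) := by
    conv_lhs => rw [← List.reverse_reverse descL]
    exact outerA_reverse descL.reverse 0 k
  have hAsq : squash (simA ps 0 k) =
      if T = n then none
      else some (PySem.Int.mod (k - fp n asc T) ((n : Int) - T), ps.drop T) := by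
    rw [squash_simA_lin ps 0 k (pre_head ft k ps hpre hvsft hpair)]
    have hlc := lin_char ps k T hpair (by omega)
      (by intro i hi; rw [hpslen, hvsasc]; exact P1 i hi)
      (by intro i hi hilt; rw [hpslen, hvsasc]; exact P2 i hi (by omega)) 0 (by omega)
    rw [List.drop_zero] at hlc
    rw [show cp (ps.map Prod.fst) 0 = 0 from rfl, show fp ps.length (ps.map Prod.fst) 0 = 0 from rfl,
      sub_zero] at hlc
    rw [hlc, hpslen, hvsasc]
  by_cases hTn : T = n
  · rw [if_pos hTn] at hAsq
    rw [houter]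
    rcases (squash_eq_none _).mp hAsq with hnone | ⟨k', hsome⟩
    · rw [hnone, if_pos hTn]
      rfl
    · rw [hsome, if_pos hTn]
      simp only [Option.map_some, List.reverse_nil]
      rw [if_pos (List.length_eq_zero_iff.mp (by
        rw [PySem.List.length_sorted]
        rfl))]
  · -- the show is interrupted: index the survivors
    rw [if_neg hTn] at hAsq
    have hsim := squash_eq_some _ _ hAsq
    rw [houter, hsim, if_neg hTn]
    simp only [Option.map_some]
    have hTlt : T < n := by omega
    have hpos : (0 : Int) < (n : Int) - T := by
      have : (T : Int) < (n : Int) := by exact_mod_cast hTlt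
      omega
    have hr0 : 0 ≤ PySem.Int.mod (k - fp n asc T) ((n : Int) - T) :=
      PySem.Int.mod_nonneg _ hpos
    have hrlt : PySem.Int.mod (k - fp n asc T) ((n : Int) - T) < (n : Int) - T :=
      PySem.Int.mod_lt _ hpos
    have hdroplen2 : (ps.drop T).length = n - T := by rw [List.length_drop, hpslen]
    have hslen : (PySem.List.sorted ((ps.drop T).reverse) (fun x => x.2)).length = n - T := by
      rw [PySem.List.length_sorted, List.length_reverse, hdroplen2]
    rw [if_neg (by
      intro hcon
      rw [hcon] at hslen
      simp at hslen
      omega)]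
    have hfpB : (if 0 < T then PySem.List.pyGetD fs ((T : Int) - 1) 0 else 0) = fp n asc T := by
      by_cases hT0 : 0 < T
      · rw [if_pos hT0,
          show ((T : Int) - 1) = ((T - 1 : Nat) : Int) by push_cast; omega,
          PySem.List.pyGetD_natCast, getD_eq_getElem' fs (T - 1) (by omega),
          hfsget (T - 1) (by omega), fp, if_neg (by omega)]
      · rw [if_neg hT0]
        have : T = 0 := by omega
        rw [this]
        rfl
    rw [hfpB]
    set r := PySem.Int.mod (k - fp n asc T) ((n : Int) - T) with hrdef
    have hrnat : (r.toNat : Int) = r := Int.toNat_of_nonneg hr0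
    have hrnatlt : r.toNat < n - T := by omega
    by_cases hT0 : T = 0
    · rw [if_pos hT0, hT0, List.drop_zero]
      have hsorteq : PySem.List.sorted ps.reverse (fun x => x.2) = sw := by
        apply PySem.List.sorted_eq_of_perm_of_pairwise_lt
        · exact hperm.symm.trans (List.reverse_perm ps).symm
        · exact hswpair
      rw [hsorteq]
      have hswlen : sw.length = n := by rw [hsw, List.length_map, henlen]
      rw [PySem.List.pyGetD_eq_getElem sw (0, 0) hr0 (by
        rw [hswlen]
        rw [hT0] at hrlt
        omega),
        PySem.List.pyGetD_eq_getElem (PySem.List.pyRange 1 ((n : Int) + 1)) 0 hr0 (by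
          rw [PySem.List.length_pyRange_one]
          rw [hT0] at hrlt
          omega)]
      rw [PySem.List.getElem_pyRange_one 1 ((n : Int) + 1) r.toNat (by
        rw [PySem.List.length_pyRange_one]
        rw [hT0] at hrlt
        omega)]
      simp only [hsw, List.getElem_map, hen, PySem.List.getElem_enumerate]
    · -- 0 < T : survivors are the foods strictly above the cutoff value
      rw [if_neg hT0]
      have hcutv : PySem.List.pyGetD asc ((T : Int) - 1) 0 = asc.getD (T - 1) 0 := by
        rw [show ((T : Int) - 1) = ((T - 1 : Nat) : Int) by push_cast; omega,
          PySem.List.pyGetD_natCast]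
      rw [hcutv]
      have hascget : ∀ i (h : i < n), asc.getD i 0 = (ps[i]'(by omega)).1 := by
        intro i h
        rw [← hvsasc, getD_eq_getElem' _ i (by rw [List.length_map, hpslen]; omega)]
        rw [List.getElem_map]
      have h1 : fspec n asc (T - 1) ≤ k := P1 (T - 1) (by omega)
      have h2 : k < fspec n asc T := P2 T (le_refl _) hTlt
      have hstep := fspec_step n asc hasclen T hTlt
      have hfpT : fp n asc T = fspec n asc (T - 1) := by rw [fp, if_neg (by omega)]
      have hcpT : cp asc T = asc.getD (T - 1) 0 := by rw [cp, if_neg (by omega)]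
      have hstrict : asc.getD (T - 1) 0 < asc.getD T 0 := by
        by_contra hcon
        push_neg at hcon
        rw [hfpT, hcpT] at hstep
        nlinarith [hstep, h1, h2, hpos, hcon]
      have hcutgt : asc.getD (T - 1) 0 < (ps[T]'(by omega)).1 := by
        rw [← hascget T (by omega)]
        exact hstrict
      have hcutle : ∀ i (h : i < ps.length), i < T → (ps[i]'h).1 ≤ asc.getD (T - 1) 0 := by
        intro i h hi
        rw [hascget (T - 1) (by omega)]
        rcases Nat.lt_or_ge i (T - 1) with hlt | hge
        · exact List.pairwise_iff_getElem.mp hpair i (T - 1) h (by omega) hlt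
        · have : i = T - 1 := by omega
          subst this
          exact le_refl _
      have hfil := drop_eq_filter ps T (asc.getD (T - 1) 0) hpair (by omega) hcutle hcutgt
      have hpermf : (sw.filter (fun x => decide (asc.getD (T - 1) 0 < x.1))).Perm
          ((ps.drop T).reverse) := by
        refine (List.Perm.filter _ hperm.symm).trans ?_
        rw [← hfil]
        exact (List.reverse_perm _).symm
      have hsorteq : PySem.List.sorted ((ps.drop T).reverse) (fun x => x.2) =
          sw.filter (fun x => decide (asc.getD (T - 1) 0 < x.1)) :=
        PySem.List.sorted_eq_of_perm_of_pairwise_lt _ _ _ hpermf (hswpair.filter _)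
      rw [hsorteq]
      have hysflen : (sw.filter (fun x => decide (asc.getD (T - 1) 0 < x.1))).length = n - T := by
        rw [hpermf.length_eq, List.length_reverse, hdroplen2]
      have hfil2 : sw.filter (fun x => decide (asc.getD (T - 1) 0 < x.1)) =
          (en.filter (fun p => decide (asc.getD (T - 1) 0 < p.2))).map
            (fun p => ((p.2 : Int), (p.1 : Int))) := by
        rw [hsw, List.filter_map]
        rfl
      have hsurvlen : ((en.filter (fun p => decide (asc.getD (T - 1) 0 < p.2))).map
          (fun p => (p.1 : Int))).length = n - T := by
        rw [List.length_map]
        have := hysflen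
        rw [hfil2, List.length_map] at this
        exact this
      rw [PySem.List.pyGetD_eq_getElem _ (0, 0) hr0 (by rw [hysflen]; omega),
        PySem.List.pyGetD_eq_getElem _ 0 hr0 (by rw [hsurvlen]; omega)]
      simp only [hfil2, List.getElem_map]

-- ===== VERDICT (by name: the statement is the Claim_ definition above) =====
theorem solution_spec : Claim_equal_solution := by
  intro ft k _ hpre
  unfold Spec_solution
  exact solution_eq_alt ft k hpre
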